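-- pv_equiv track=rewrite | github.com/prashgarg/frontiergraph | scripts/build_exploratory_testbeds.py | _shortest_path_cap
-- ===== SOURCE A (Python) =====
-- from collections import Counter, defaultdict, deque
--
-- DISTANCE_CAP = 6
--
-- def _shortest_path_cap(adj: dict[str, set[str]], start: str, targets: set[str], cap: int = DISTANCE_CAP) -> int | None:
--     if start in targets:
--         return 0
--     seen = {start}
--     q = deque([(start, 0)])
--     while q:
--         node, dist = q.popleft()
--         if dist >= cap:
--             continue
--         for nxt in adj.get(node, set()):
--             if nxt in seen:
--                 continue
--             if nxt in targets:
--                 return dist + 1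
--             seen.add(nxt)
--             q.append((nxt, dist + 1))
--     return None
-- ===== SOURCE B (Python) =====
-- DISTANCE_CAP = 6
--
-- def _shortest_path_cap(adj, start, targets, cap=DISTANCE_CAP):
--     # Fixed-point reachability: grow the set of nodes reachable within d hops,
--     # one hop per round; return the first round whose reach-set hits a target.
--     reached = {start}
--     for d in range(max(cap, 0) + 1):
--         if reached & targets:
--             return d
--         new = set(reached)
--         for node in reached:
--             new |= adj.get(node, set())
--         if new == reached:      # nothing new reachable: no target within cap
--             return None
--         reached = new
--     return None
-- ===== Notes on version B (the rewrite author's own statement) =====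
-- stated objective: alternative
-- what changed: Replaces the seen-set + (node,dist) deque BFS by an iterative fixed-point computation: one 'reached within d hops' set grown by re-expanding all its members each round, returning the first round that intersects the targets (no queue, no per-node distances, no early return inside the neighbor scan).
import Mathlib
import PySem

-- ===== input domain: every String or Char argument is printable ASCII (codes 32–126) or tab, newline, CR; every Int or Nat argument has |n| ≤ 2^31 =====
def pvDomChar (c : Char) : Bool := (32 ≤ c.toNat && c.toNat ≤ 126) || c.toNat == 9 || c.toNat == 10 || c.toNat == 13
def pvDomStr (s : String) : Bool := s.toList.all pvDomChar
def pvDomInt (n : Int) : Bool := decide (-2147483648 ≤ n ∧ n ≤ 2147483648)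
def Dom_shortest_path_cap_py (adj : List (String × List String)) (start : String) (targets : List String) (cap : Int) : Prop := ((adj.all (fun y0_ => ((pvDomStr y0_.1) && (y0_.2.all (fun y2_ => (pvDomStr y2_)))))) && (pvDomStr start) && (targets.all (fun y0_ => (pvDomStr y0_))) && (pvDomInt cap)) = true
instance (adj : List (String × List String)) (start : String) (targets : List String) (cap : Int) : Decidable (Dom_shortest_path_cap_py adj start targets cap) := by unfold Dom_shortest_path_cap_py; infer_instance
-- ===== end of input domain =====

-- B replaces A's seen-set + (node,dist)-deque BFS by an iterative fixed-point
-- reachability computation (grow one reach-set a hop per round, no queue);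
-- equivalence of the two is proved below (objective: alternative algorithm).

-- `adj.get(node, set())` — first-match dict lookup with an empty default (shared by both ports)
def pvNbrs (adj : List (String × List String)) (node : String) : List String :=
  (PySem.Dict.mk adj).getD node []

-- number of strings occurring in adj's value lists that are not yet `seen`;
-- used only to compute a provably sufficient fuel for A's while-loop
def pvMiss (adj : List (String × List String)) (seen : PySem.Set String) : Nat :=
  ((adj.flatMap (fun p => p.2)).filter (fun x => !(PySem.Set.contains seen x))).length

-- ===== PORT A =====
-- inner `for nxt in adj.get(node, set())`: threads (seen, q); .error = early `return dist + 1`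
def pvInnerA (targets : List String) (dist : Int) :
    List String → PySem.Set String → List (String × Int) → Except Int (PySem.Set String × List (String × Int))
  | [], seen, q => .ok (seen, q)
  | nxt :: ns, seen, q =>
    if PySem.Set.contains seen nxt then pvInnerA targets dist ns seen q
    else if targets.contains nxt then .error (dist + 1)
    else pvInnerA targets dist ns (PySem.Set.add seen nxt) (q ++ [(nxt, dist + 1)])

-- `while q:` — fuel is a provably sufficient bound on the number of pops (the 0-branch is never reached)
def pvLoopA (adj : List (String × List String)) (targets : List String) (cap : Int) :
    Nat → PySem.Set String → List (String × Int) → Option Int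
  | 0, _, _ => none
  | _ + 1, _, [] => none
  | fuel + 1, seen, (node, dist) :: rest =>
    if cap ≤ dist then pvLoopA adj targets cap fuel seen rest
    else
      match pvInnerA targets dist (pvNbrs adj node) seen rest with
      | .error r => some r
      | .ok (seen', q') => pvLoopA adj targets cap fuel seen' q'

def shortest_path_cap_py (adj : List (String × List String)) (start : String) (targets : List String) (cap : Int) : Option Int :=
  if targets.contains start then some 0
  else
    pvLoopA adj targets cap (2 * pvMiss adj (PySem.Set.ofList [start]) + 2)
      (PySem.Set.ofList [start]) [(start, 0)]

-- ===== PORT B =====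
-- `new = set(reached); for node in reached: new |= adj.get(node, set())`
def pvExpand (adj : List (String × List String)) (R : PySem.Set String) : PySem.Set String :=
  R.foldl (fun new node => PySem.Set.union new (pvNbrs adj node)) R

-- `for d in range(max(cap, 0) + 1):` — structural countdown over the exact number of rounds, d carried
def pvGrow (adj : List (String × List String)) (targets : List String) :
    Nat → Int → PySem.Set String → Option Int
  | 0, _, _ => none
  | n + 1, d, reached =>
    if !(PySem.Set.inter reached targets).isEmpty then some d
    else
      let new := pvExpand adj reached
      if PySem.Set.equal new reached then none
      else pvGrow adj targets n (d + 1) new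

def shortest_path_cap_py_alt (adj : List (String × List String)) (start : String) (targets : List String) (cap : Int) : Option Int :=
  pvGrow adj targets (max cap 0 + 1).toNat 0 (PySem.Set.ofList [start])

-- ===== PRECONDITION & SPEC =====
def Spec_shortest_path_cap_py (adj : List (String × List String)) (start : String) (targets : List String) (cap : Int) (out : Option Int) : Prop := out = shortest_path_cap_py_alt adj start targets cap
instance (adj : List (String × List String)) (start : String) (targets : List String) (cap : Int) (out : Option Int) : Decidable (Spec_shortest_path_cap_py adj start targets cap out) := by unfold Spec_shortest_path_cap_py; infer_instance

-- ===== CLAIM (what is proved, stated in full; the proofs are below) =====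
def Claim_equal_shortest_path_cap_py : Prop := ∀ (adj : List (String × List String)) (start : String) (targets : List String) (cap : Int), Dom_shortest_path_cap_py adj start targets cap → Spec_shortest_path_cap_py adj start targets cap (shortest_path_cap_py adj start targets cap)

-- ===== LEMMAS AND PROOFS =====

-- Proof-internal intermediate: a level-synchronous BFS (seen, frontier-per-level);
-- A's queue loop is proved equal to it, and it in turn equal to B's fixed-point loop.
def pvScanB (targets : List String) (d : Int) :
    List String → PySem.Set String → List String → Except Int (PySem.Set String × List String)
  | [], seen, acc => .ok (seen, acc)
  | nxt :: ns, seen, acc =>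
    if PySem.Set.contains seen nxt then pvScanB targets d ns seen acc
    else if targets.contains nxt then .error (d + 1)
    else pvScanB targets d ns (PySem.Set.add seen nxt) (acc ++ [nxt])

def pvLevelB (adj : List (String × List String)) (targets : List String) (d : Int) :
    List String → PySem.Set String → List String → Except Int (PySem.Set String × List String)
  | [], seen, acc => .ok (seen, acc)
  | node :: ms, seen, acc =>
    match pvScanB targets d (pvNbrs adj node) seen acc with
    | .error r => .error r
    | .ok (seen', acc') => pvLevelB adj targets d ms seen' acc'

def pvLoopLvl (adj : List (String × List String)) (targets : List String) (cap : Int) :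
    Nat → PySem.Set String → List String → Int → Option Int
  | 0, _, _, _ => none
  | fuel + 1, seen, frontier, d =>
    if frontier.isEmpty ∨ cap ≤ d then none
    else
      match pvLevelB adj targets d frontier seen [] with
      | .error r => some r
      | .ok (seen', nf) => pvLoopLvl adj targets cap fuel seen' nf (d + 1)

-- filter length is monotone / strictly monotone in the predicate
theorem pvFilterMono (p q : String → Bool) (l : List String)
    (h : ∀ a ∈ l, p a = true → q a = true) : (l.filter p).length ≤ (l.filter q).length := by
  rw [← List.countP_eq_length_filter, ← List.countP_eq_length_filter]
  exact List.countP_mono_left h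

theorem pvFilterStrict (p q : String → Bool) (l : List String) (a : String)
    (h : ∀ b ∈ l, p b = true → q b = true) (ha : a ∈ l) (hpa : p a = false) (hqa : q a = true) :
    (l.filter p).length < (l.filter q).length := by
  induction l with
  | nil => simp at ha
  | cons b l ih =>
    rcases List.mem_cons.mp ha with rfl | hb
    · simp only [List.filter_cons, hpa, hqa]
      simp only [Bool.false_eq_true, if_false, if_true, List.length_cons]
      have := pvFilterMono p q l (fun c hc => h c (List.mem_cons_of_mem _ hc))
      omega
    · have := ih (fun c hc => h c (List.mem_cons_of_mem _ hc)) hb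
      by_cases hpb : p b = true <;> by_cases hqb : q b = true
      · simp [hpb, hqb]; omega
      · exact absurd (h b List.mem_cons_self hpb) (by simp [hqb])
      · simp [hpb, hqb]; omega
      · simp [hpb, hqb]; omega

-- every neighbour list returned by the dict lookup sits inside adj's value lists
theorem pvNbrs_subset (adj : List (String × List String)) (node x : String)
    (hx : x ∈ pvNbrs adj node) : x ∈ adj.flatMap (fun p => p.2) := by
  induction adj with
  | nil => simp [pvNbrs, PySem.Dict.getD, PySem.Dict.get?] at hx
  | cons p rest ih =>
    simp only [pvNbrs, PySem.Dict.getD] at hx ih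
    rw [PySem.Dict.get?_mk_cons] at hx
    by_cases h : p.1 == node
    · simp [h] at hx
      exact List.mem_flatMap.mpr ⟨p, List.mem_cons_self, hx⟩
    · simp [h] at hx
      have := ih hx
      simp [List.mem_flatMap] at this ⊢
      tauto

-- adding an unseen element of adj's values strictly shrinks pvMiss
theorem pvMiss_add (adj : List (String × List String)) (seen : PySem.Set String) (nxt : String)
    (hU : nxt ∈ adj.flatMap (fun p => p.2)) (hns : PySem.Set.contains seen nxt = false) :
    pvMiss adj (PySem.Set.add seen nxt) + 1 ≤ pvMiss adj seen := by
  unfold pvMiss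
  have h := pvFilterStrict (fun x => !(PySem.Set.contains (PySem.Set.add seen nxt) x))
      (fun x => !(PySem.Set.contains seen x)) (adj.flatMap (fun p => p.2)) nxt
      (by intro b hb; simp [pysem, PySem.Set.mem_add]; tauto)
      hU (by simp [pysem, PySem.Set.mem_add]) (by simp [pysem]; simpa [pysem] using hns)
  omega

-- a seen-set that grew by an element of adj's values strictly shrinks pvMiss
theorem pvMiss_lt (adj : List (String × List String)) (seen seen' : PySem.Set String) (x : String)
    (hsub : ∀ y, y ∈ seen → y ∈ seen') (hx' : x ∈ seen') (hx : x ∉ seen)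
    (hU : x ∈ adj.flatMap (fun p => p.2)) : pvMiss adj seen' < pvMiss adj seen := by
  unfold pvMiss
  exact pvFilterStrict (fun y => !(PySem.Set.contains seen' y))
      (fun y => !(PySem.Set.contains seen y)) (adj.flatMap (fun p => p.2)) x
      (by intro b _; simp [pysem]; intro h hb; exact h (hsub b hb))
      hU (by simp [pysem, hx']) (by simp [pysem, hx])

-- pvScanB's measure: (|acc| + miss) and (|acc| + 2·miss) never increase
theorem pvScanB_measure (adj : List (String × List String)) (targets : List String) (d : Int) :
    ∀ (ns : List String) (seen : PySem.Set String) (acc : List String)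
      (s1 : PySem.Set String) (acc1 : List String),
      (∀ x ∈ ns, x ∈ adj.flatMap (fun p => p.2)) →
      pvScanB targets d ns seen acc = .ok (s1, acc1) →
      acc1.length + pvMiss adj s1 ≤ acc.length + pvMiss adj seen ∧
      acc1.length + 2 * pvMiss adj s1 ≤ acc.length + 2 * pvMiss adj seen := by
  intro ns
  induction ns with
  | nil =>
    intro seen acc s1 acc1 _ h
    simp only [pvScanB] at h
    injection h with h
    injection h with h1 h2
    subst h1; subst h2; omega
  | cons nxt ns ih =>
    intro seen acc s1 acc1 hU h
    simp only [pvScanB] at h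
    by_cases hc : PySem.Set.contains seen nxt
    · rw [if_pos hc] at h
      exact ih seen acc s1 acc1 (fun x hx => hU x (List.mem_cons_of_mem _ hx)) h
    · rw [if_neg hc] at h
      by_cases ht : targets.contains nxt
      · rw [if_pos ht] at h; cases h
      · rw [if_neg ht] at h
        have hmem : nxt ∈ adj.flatMap (fun p => p.2) := hU nxt List.mem_cons_self
        have hadd := pvMiss_add adj seen nxt hmem (by simpa using hc)
        have := ih (PySem.Set.add seen nxt) (acc ++ [nxt]) s1 acc1
          (fun x hx => hU x (List.mem_cons_of_mem _ hx)) h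
        simp only [List.length_append, List.length_cons, List.length_nil] at this
        omega

-- A's inner loop is the level scan, with the queue suffix carried along
theorem pvInnerA_eq_scanB (targets : List String) (d : Int) :
    ∀ (ns : List String) (seen : PySem.Set String) (cur' acc : List String),
      pvInnerA targets d ns seen
        (cur'.map (fun n => (n, d)) ++ acc.map (fun n => (n, d + 1))) =
      (match pvScanB targets d ns seen acc with
       | .error r => .error r
       | .ok (s1, acc1) => .ok (s1, cur'.map (fun n => (n, d)) ++ acc1.map (fun n => (n, d + 1)))) := by
  intro ns
  induction ns with
  | nil => intro seen cur' acc; simp [pvInnerA, pvScanB]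
  | cons nxt ns ih =>
    intro seen cur' acc
    simp only [pvInnerA, pvScanB]
    by_cases hc : PySem.Set.contains seen nxt
    · rw [if_pos hc, if_pos hc]; exact ih seen cur' acc
    · rw [if_neg hc, if_neg hc]
      by_cases ht : targets.contains nxt
      · rw [if_pos ht, if_pos ht]
      · rw [if_neg ht, if_neg ht]
        have : cur'.map (fun n => (n, d)) ++ acc.map (fun n => (n, d + 1)) ++ [(nxt, d + 1)]
            = cur'.map (fun n => (n, d)) ++ (acc ++ [nxt]).map (fun n => (n, d + 1)) := by
          simp
        rw [this]
        exact ih (PySem.Set.add seen nxt) cur' (acc ++ [nxt])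

-- A skips every queue entry whose distance has reached the cap
theorem pvLoopA_skip (adj : List (String × List String)) (targets : List String) (cap : Int) :
    ∀ (q : List (String × Int)) (fuel : Nat) (seen : PySem.Set String),
      (∀ p ∈ q, cap ≤ p.2) → q.length ≤ fuel →
      pvLoopA adj targets cap fuel seen q = none := by
  intro q
  induction q with
  | nil => intro fuel seen _ _; cases fuel <;> simp [pvLoopA]
  | cons p rest ih =>
    intro fuel seen hall hlen
    obtain ⟨node, dist⟩ := p
    cases fuel with
    | zero => simp at hlen
    | succ f =>
      simp only [pvLoopA]
      rw [if_pos (hall (node, dist) List.mem_cons_self)]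
      exact ih f seen (fun p hp => hall p (List.mem_cons_of_mem _ hp)) (by simpa using Nat.lt_succ_iff.mp (by simpa using hlen))

-- BRIDGE 1: A's queue at state ⟨current level cur at depth d, next level acc⟩
-- computes exactly the level loop's remaining scan followed by its next levels
theorem pvBridge (adj : List (String × List String)) (targets : List String) (cap : Int) :
    ∀ (g : Nat) (d : Int) (cur acc : List String) (seen : PySem.Set String) (fA : Nat),
      d < cap →
      cur.length + acc.length + 2 * pvMiss adj seen < fA →
      pvMiss adj seen + acc.length + 2 ≤ g →
      pvLoopA adj targets cap fA seen
        (cur.map (fun n => (n, d)) ++ acc.map (fun n => (n, d + 1))) =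
      (match pvLevelB adj targets d cur seen acc with
       | .error r => some r
       | .ok (s1, nf) => pvLoopLvl adj targets cap g s1 nf (d + 1)) := by
  intro g
  induction g with
  | zero => intro d cur acc seen fA hd h1 h2; omega
  | succ g ihg =>
    intro d cur acc seen fA hd h1 h2
    revert h1 h2
    induction cur generalizing acc seen fA with
    | nil =>
      intro h1 h2
      simp only [List.map_nil, List.nil_append, pvLevelB, pvLoopLvl]
      by_cases hacc : acc = []
      · subst hacc
        simp only [List.map_nil, List.isEmpty_nil, true_or, if_pos]
        cases fA <;> simp [pvLoopA]
      · have hlen : 0 < acc.length := List.length_pos_of_ne_nil hacc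
        by_cases hcap : cap ≤ d + 1
        · rw [if_pos (Or.inr hcap)]
          apply pvLoopA_skip adj targets cap (acc.map (fun n => (n, d + 1))) fA seen
          · intro p hp
            obtain ⟨n, _, rfl⟩ := List.mem_map.mp hp
            exact hcap
          · simp only [List.length_map]; omega
        · rw [if_neg (by simp [hacc, hcap])]
          have hb := ihg (d + 1) acc [] seen fA (by omega)
            (by simpa using (by omega : acc.length + 2 * pvMiss adj seen < fA))
            (by simpa using (by omega : pvMiss adj seen + 2 ≤ g))
          simpa using hb
    | cons node cur' ihc =>
      intro h1 h2
      cases fA with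
      | zero => omega
      | succ f =>
        simp only [List.map_cons, List.cons_append, pvLoopA]
        rw [if_neg (by omega : ¬ cap ≤ d)]
        rw [pvInnerA_eq_scanB targets d (pvNbrs adj node) seen cur' acc]
        cases hscan : pvScanB targets d (pvNbrs adj node) seen acc with
        | error r => simp only [pvLevelB, hscan]
        | ok p =>
          obtain ⟨s1, acc1⟩ := p
          simp only [pvLevelB, hscan]
          have hm := pvScanB_measure adj targets d (pvNbrs adj node) seen acc s1 acc1
            (fun x hx => pvNbrs_subset adj node x hx) hscan
          have hcl : cur'.length + 1 + acc.length + 2 * pvMiss adj seen < f + 1 := by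
            simpa using h1
          exact ihc acc1 s1 f (by omega) (by omega)

-- membership / no-new-target characterisation of a successful level scan
theorem pvScanB_ok_mem (targets : List String) (d : Int) :
    ∀ (ns : List String) (seen : PySem.Set String) (acc : List String)
      (s1 : PySem.Set String) (acc1 : List String),
      pvScanB targets d ns seen acc = .ok (s1, acc1) →
      (∀ x, x ∈ s1 ↔ x ∈ seen ∨ x ∈ ns) ∧
      (∀ x, x ∈ acc1 ↔ x ∈ acc ∨ (x ∈ ns ∧ x ∉ seen)) ∧
      (∀ x, x ∈ s1 → x ∉ seen → x ∉ targets) := by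
  intro ns
  induction ns with
  | nil =>
    intro seen acc s1 acc1 h
    simp only [pvScanB] at h
    injection h with h; injection h with h1 h2; subst h1; subst h2
    exact ⟨by simp, by simp, fun x hx hn => absurd hx hn⟩
  | cons nxt ns ih =>
    intro seen acc s1 acc1 h
    simp only [pvScanB] at h
    by_cases hc : PySem.Set.contains seen nxt
    · rw [if_pos hc] at h
      have hcm : nxt ∈ seen := by simpa using hc
      obtain ⟨h1, h2, h3⟩ := ih seen acc s1 acc1 h
      refine ⟨fun x => ?_, fun x => ?_, h3⟩
      · rw [h1 x]; simp only [List.mem_cons]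
        constructor
        · tauto
        · rintro (hx | rfl | hx)
          · exact Or.inl hx
          · exact Or.inl hcm
          · exact Or.inr hx
      · rw [h2 x]; simp only [List.mem_cons]
        constructor
        · tauto
        · rintro (hx | ⟨(rfl | hx), hns⟩)
          · exact Or.inl hx
          · exact absurd hcm hns
          · exact Or.inr ⟨hx, hns⟩
    · rw [if_neg hc] at h
      have hcm : nxt ∉ seen := by simpa using hc
      by_cases ht : targets.contains nxt
      · rw [if_pos ht] at h; cases h
      · rw [if_neg ht] at h
        have htm : nxt ∉ targets := by simpa using ht
        obtain ⟨h1, h2, h3⟩ := ih (PySem.Set.add seen nxt) (acc ++ [nxt]) s1 acc1 h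
        refine ⟨fun x => ?_, fun x => ?_, fun x hx hns => ?_⟩
        · rw [h1 x]
          simp only [PySem.Set.mem_add, List.mem_cons]
          tauto
        · rw [h2 x]
          simp only [List.mem_append, PySem.Set.mem_add, List.mem_cons, List.not_mem_nil, or_false]
          constructor
          · rintro ((hx | rfl) | ⟨hx, hns⟩)
            · exact Or.inl hx
            · exact Or.inr ⟨Or.inl rfl, hcm⟩
            · exact Or.inr ⟨Or.inr hx, fun hm => hns (Or.inl hm)⟩
          · rintro (hx | ⟨(rfl | hx), hns⟩)
            · exact Or.inl (Or.inl hx)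
            · exact Or.inl (Or.inr rfl)
            · by_cases hxn : x = nxt
              · exact Or.inl (Or.inr hxn)
              · exact Or.inr ⟨hx, fun hm => hm.elim hns hxn⟩
        · by_cases hxn : x = nxt
          · subst hxn; exact htm
          · refine h3 x hx (fun hm => ?_)
            exact ((PySem.Set.mem_add seen nxt x).mp hm).elim hns hxn

-- a level scan fails exactly with value d+1, on an unseen target neighbour
theorem pvScanB_error (targets : List String) (d : Int) :
    ∀ (ns : List String) (seen : PySem.Set String) (acc : List String) (r : Int),
      pvScanB targets d ns seen acc = .error r →
      r = d + 1 ∧ ∃ x, x ∈ ns ∧ x ∈ targets ∧ x ∉ seen := by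
  intro ns
  induction ns with
  | nil => intro seen acc r h; simp [pvScanB] at h
  | cons nxt ns ih =>
    intro seen acc r h
    simp only [pvScanB] at h
    by_cases hc : PySem.Set.contains seen nxt
    · rw [if_pos hc] at h
      obtain ⟨hr, x, hx, hxt, hxs⟩ := ih seen acc r h
      exact ⟨hr, x, List.mem_cons_of_mem _ hx, hxt, hxs⟩
    · rw [if_neg hc] at h
      have hcm : nxt ∉ seen := by simpa using hc
      by_cases ht : targets.contains nxt
      · rw [if_pos ht] at h
        injection h with h
        exact ⟨h.symm, nxt, List.mem_cons_self, by simpa using ht, hcm⟩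
      · rw [if_neg ht] at h
        obtain ⟨hr, x, hx, hxt, hxs⟩ := ih (PySem.Set.add seen nxt) (acc ++ [nxt]) r h
        exact ⟨hr, x, List.mem_cons_of_mem _ hx, hxt,
          fun hm => hxs ((PySem.Set.mem_add seen nxt x).mpr (Or.inl hm))⟩

-- membership / no-new-target characterisation of a successful whole level
theorem pvLevelB_ok_mem (adj : List (String × List String)) (targets : List String) (d : Int) :
    ∀ (fr : List String) (seen : PySem.Set String) (acc : List String)
      (s1 : PySem.Set String) (acc1 : List String),
      pvLevelB adj targets d fr seen acc = .ok (s1, acc1) →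
      (∀ x, x ∈ s1 ↔ x ∈ seen ∨ ∃ node ∈ fr, x ∈ pvNbrs adj node) ∧
      (∀ x, x ∈ acc1 ↔ x ∈ acc ∨ ((∃ node ∈ fr, x ∈ pvNbrs adj node) ∧ x ∉ seen)) ∧
      (∀ x, x ∈ s1 → x ∉ seen → x ∉ targets) := by
  intro fr
  induction fr with
  | nil =>
    intro seen acc s1 acc1 h
    simp only [pvLevelB] at h
    injection h with h; injection h with h1 h2; subst h1; subst h2
    exact ⟨by simp, by simp, fun x hx hn => absurd hx hn⟩
  | cons node ms ih =>
    intro seen acc s1 acc1 h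
    simp only [pvLevelB] at h
    cases hscan : pvScanB targets d (pvNbrs adj node) seen acc with
    | error r => rw [hscan] at h; cases h
    | ok p =>
      obtain ⟨s', a'⟩ := p
      rw [hscan] at h
      obtain ⟨g1, g2, g3⟩ := pvScanB_ok_mem targets d (pvNbrs adj node) seen acc s' a' hscan
      obtain ⟨h1, h2, h3⟩ := ih s' a' s1 acc1 h
      refine ⟨fun x => ?_, fun x => ?_, fun x hx hns => ?_⟩
      · rw [h1 x, g1 x]
        simp only [List.mem_cons]
        constructor
        · rintro ((hx | hx) | ⟨n, hn, hx⟩)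
          · exact Or.inl hx
          · exact Or.inr ⟨node, Or.inl rfl, hx⟩
          · exact Or.inr ⟨n, Or.inr hn, hx⟩
        · rintro (hx | ⟨n, (rfl | hn), hx⟩)
          · exact Or.inl (Or.inl hx)
          · exact Or.inl (Or.inr hx)
          · exact Or.inr ⟨n, hn, hx⟩
      · rw [h2 x, g2 x, g1 x]
        simp only [List.mem_cons]
        constructor
        · rintro ((hx | ⟨hx, hns⟩) | ⟨⟨n, hn, hx⟩, hns⟩)
          · exact Or.inl hx
          · exact Or.inr ⟨⟨node, Or.inl rfl, hx⟩, hns⟩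
          · exact Or.inr ⟨⟨n, Or.inr hn, hx⟩, fun hm => hns (Or.inl hm)⟩
        · rintro (hx | ⟨⟨n, (rfl | hn), hx⟩, hns⟩)
          · exact Or.inl (Or.inl hx)
          · exact Or.inl (Or.inr ⟨hx, hns⟩)
          · by_cases hxs : x ∈ s'
            · rcases (g1 x).mp hxs with hx' | hx'
              · exact absurd hx' hns
              · exact Or.inl (Or.inr ⟨hx', hns⟩)
            · exact Or.inr ⟨⟨n, hn, hx⟩, fun hm => hxs ((g1 x).mpr hm)⟩
      · by_cases hxs : x ∈ s'
        · exact g3 x hxs hns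
        · exact h3 x hx hxs

-- a level fails exactly with value d+1, on an unseen target neighbour of the frontier
theorem pvLevelB_error (adj : List (String × List String)) (targets : List String) (d : Int) :
    ∀ (fr : List String) (seen : PySem.Set String) (acc : List String) (r : Int),
      pvLevelB adj targets d fr seen acc = .error r →
      r = d + 1 ∧ ∃ x, x ∈ targets ∧ x ∉ seen ∧ ∃ node ∈ fr, x ∈ pvNbrs adj node := by
  intro fr
  induction fr with
  | nil => intro seen acc r h; simp [pvLevelB] at h
  | cons node ms ih =>
    intro seen acc r h
    simp only [pvLevelB] at h
    cases hscan : pvScanB targets d (pvNbrs adj node) seen acc with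
    | error r' =>
      rw [hscan] at h
      injection h with h; subst h
      obtain ⟨hr, x, hx, hxt, hxs⟩ := pvScanB_error targets d (pvNbrs adj node) seen acc r' hscan
      exact ⟨hr, x, hxt, hxs, node, List.mem_cons_self, hx⟩
    | ok p =>
      obtain ⟨s', a'⟩ := p
      rw [hscan] at h
      obtain ⟨g1, _, _⟩ := pvScanB_ok_mem targets d (pvNbrs adj node) seen acc s' a' hscan
      obtain ⟨hr, x, hxt, hxs, n, hn, hx⟩ := ih s' a' r h
      exact ⟨hr, x, hxt, fun hm => hxs ((g1 x).mpr (Or.inl hm)), n, List.mem_cons_of_mem _ hn, hx⟩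

-- membership of the fixed-point expansion step
theorem pvExpand_foldl_mem (adj : List (String × List String)) :
    ∀ (l : List String) (s : PySem.Set String) (x : String),
      x ∈ l.foldl (fun new node => PySem.Set.union new (pvNbrs adj node)) s ↔
        x ∈ s ∨ ∃ node ∈ l, x ∈ pvNbrs adj node := by
  intro l
  induction l with
  | nil => intro s x; simp
  | cons a l ih =>
    intro s x
    simp only [List.foldl_cons, ih, PySem.Set.mem_union, List.mem_cons]
    constructor
    · rintro ((hx | hx) | ⟨n, hn, hx⟩)
      · exact Or.inl hx
      · exact Or.inr ⟨a, Or.inl rfl, hx⟩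
      · exact Or.inr ⟨n, Or.inr hn, hx⟩
    · rintro (hx | ⟨n, (rfl | hn), hx⟩)
      · exact Or.inl (Or.inl hx)
      · exact Or.inl (Or.inr hx)
      · exact Or.inr ⟨n, hn, hx⟩

theorem pvExpand_mem (adj : List (String × List String)) (R : PySem.Set String) (x : String) :
    x ∈ pvExpand adj R ↔ x ∈ R ∨ ∃ node ∈ R, x ∈ pvNbrs adj node :=
  pvExpand_foldl_mem adj R R x

-- BRIDGE 2: from any pair of level-BFS / fixed-point states describing the same
-- reach-set, the two loops return the same answer
theorem pvLvl_eq_grow (adj : List (String × List String)) (targets : List String) (cap : Int) :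
    ∀ (n : Nat) (g : Nat) (seen R : PySem.Set String) (frontier : List String) (d : Int),
      (∀ x, x ∈ seen ↔ x ∈ R) →
      (∀ x ∈ frontier, x ∈ seen) →
      (∀ node ∈ seen, node ∉ frontier → ∀ x ∈ pvNbrs adj node, x ∈ seen) →
      (∀ x ∈ seen, x ∉ targets) →
      0 ≤ d → d + (n : Int) = max cap 0 + 1 →
      pvMiss adj seen + 2 ≤ g →
      pvLoopLvl adj targets cap g seen frontier d = pvGrow adj targets n d R := by
  intro n
  induction n with
  | zero =>
    intro g seen R frontier d _ _ _ _ hd0 hd hg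
    have hcap : cap ≤ d := by
      have : cap ≤ max cap 0 := le_max_left _ _
      omega
    obtain ⟨g', rfl⟩ : ∃ g', g = g' + 1 := ⟨g - 1, by omega⟩
    simp [pvLoopLvl, pvGrow, hcap]
  | succ n ihn =>
    intro g seen R frontier d hmemeq hfr hclosed htgt hd0 hd hg
    -- the round's target check is false
    have hRt : ∀ x ∈ R, x ∉ targets := fun x hx => htgt x ((hmemeq x).mpr hx)
    have hinter : (PySem.Set.inter R targets).isEmpty = true := by
      rw [List.isEmpty_iff]
      refine List.eq_nil_iff_forall_not_mem.mpr (fun x hx => ?_)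
      rw [PySem.Set.mem_inter] at hx
      exact hRt x hx.1 hx.2
    obtain ⟨g', rfl⟩ : ∃ g', g = g' + 1 := ⟨g - 1, by omega⟩
    simp only [pvGrow, hinter, Bool.not_true, Bool.false_eq_true, if_false]
    by_cases hstop : frontier.isEmpty = true ∨ cap ≤ d
    · -- level loop stops here: the fixed-point loop also returns none
      rw [pvLoopLvl, if_pos hstop]
      rcases hstop with hemp | hcap
      · -- empty frontier: the reach-set is closed, the expansion is a fixed point
        have hfe : frontier = [] := List.isEmpty_iff.mp hemp
        have hclR : ∀ x, x ∈ pvExpand adj R ↔ x ∈ R := by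
          intro x
          rw [pvExpand_mem]
          constructor
          · rintro (hx | ⟨node, hn, hx⟩)
            · exact hx
            · exact (hmemeq x).mp
                (hclosed node ((hmemeq node).mpr hn) (by simp [hfe]) x hx)
          · exact Or.inl
        rw [if_pos ((PySem.Set.equal_iff _ _).mpr hclR)]
      · -- cap reached: this is the last round, the next recursion runs out
        have hn0 : n = 0 := by
          have h1 : d ≤ max cap 0 := by omega
          have h2 : max cap 0 ≤ d := by
            by_cases h : cap ≤ 0
            · simpa [max_eq_right h] using hd0
            · calc max cap 0 = cap := max_eq_left (by omega)
                _ ≤ d := hcap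
          omega
        subst hn0
        by_cases hfix : PySem.Set.equal (pvExpand adj R) R = true
        · rw [if_pos hfix]
        · rw [if_neg hfix]; rfl
    · rw [not_or] at hstop
      obtain ⟨hfne, hdc⟩ := hstop
      rw [pvLoopLvl, if_neg (by simp [hfne, hdc])]
      -- the level's new elements are exactly what the expansion adds
      have hexp : ∀ x, x ∈ pvExpand adj R ↔ x ∈ seen ∨ ∃ node ∈ frontier, x ∈ pvNbrs adj node := by
        intro x
        rw [pvExpand_mem]
        constructor
        · rintro (hx | ⟨node, hn, hx⟩)
          · exact Or.inl ((hmemeq x).mpr hx)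
          · by_cases hnf : node ∈ frontier
            · exact Or.inr ⟨node, hnf, hx⟩
            · exact Or.inl (hclosed node ((hmemeq node).mpr hn) hnf x hx)
        · rintro (hx | ⟨node, hn, hx⟩)
          · exact Or.inl ((hmemeq x).mp hx)
          · exact Or.inr ⟨node, (hmemeq node).mp (hfr node hn), hx⟩
      cases hlvl : pvLevelB adj targets d frontier seen [] with
      | error r =>
        -- a target at distance d+1: the fixed point gains it, the next round returns d+1
        obtain ⟨hr, x, hxt, hxs, node, hn, hx⟩ := pvLevelB_error adj targets d frontier seen [] r hlvl
        have hxR : x ∉ R := fun hm => hxs ((hmemeq x).mpr hm)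
        have hxE : x ∈ pvExpand adj R := (hexp x).mpr (Or.inr ⟨node, hn, hx⟩)
        have hfix : PySem.Set.equal (pvExpand adj R) R ≠ true := by
          intro hfix
          exact hxR (((PySem.Set.equal_iff _ _).mp hfix x).mp hxE)
        rw [if_neg hfix]
        obtain ⟨n', rfl⟩ : ∃ n', n = n' + 1 := by
          refine ⟨n - 1, ?_⟩
          have : d < max cap 0 := lt_of_lt_of_le (by omega : d < cap) (le_max_left _ _)
          omega
        have hinter' : (PySem.Set.inter (pvExpand adj R) targets).isEmpty = false := by
          rw [List.isEmpty_eq_false_iff_exists_mem]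
          exact ⟨x, (PySem.Set.mem_inter _ _ _).mpr ⟨hxE, hxt⟩⟩
        simp [pvGrow, hinter', hr]
      | ok p =>
        obtain ⟨seen', nf⟩ := p
        obtain ⟨h1, h2, h3⟩ := pvLevelB_ok_mem adj targets d frontier seen [] seen' nf hlvl
        have hmemeq' : ∀ x, x ∈ seen' ↔ x ∈ pvExpand adj R := by
          intro x; rw [h1 x, hexp x]
        by_cases hnf : nf = []
        · -- no new node: the reach-set is closed; both loops return none
          subst hnf
          have hclR : ∀ x, x ∈ pvExpand adj R ↔ x ∈ R := by
            intro x
            constructor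
            · intro hx
              have hx' : x ∈ seen' := (hmemeq' x).mpr hx
              rcases (h1 x).mp hx' with hx' | ⟨node, hn, hxn⟩
              · exact (hmemeq x).mp hx'
              · by_cases hxs : x ∈ seen
                · exact (hmemeq x).mp hxs
                · exact absurd ((h2 x).mpr (Or.inr ⟨⟨node, hn, hxn⟩, hxs⟩)) (by simp)
            · intro hx; exact (pvExpand_mem adj R x).mpr (Or.inl hx)
          rw [if_pos ((PySem.Set.equal_iff _ _).mpr hclR)]
          obtain ⟨g'', rfl⟩ : ∃ g'', g' = g'' + 1 := ⟨g' - 1, by omega⟩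
          simp [pvLoopLvl]
        · -- new nodes found: recurse with the grown states
          obtain ⟨y, hy⟩ := List.exists_mem_of_ne_nil nf hnf
          obtain ⟨hyN, hys⟩ := ((h2 y).mp hy).resolve_left (by simp)
          have hyS' : y ∈ seen' := (h1 y).mpr (Or.inr hyN)
          have hfix : PySem.Set.equal (pvExpand adj R) R ≠ true := by
            intro hfix
            exact hys ((hmemeq y).mpr (((PySem.Set.equal_iff _ _).mp hfix y).mp ((hmemeq' y).mp hyS')))
          rw [if_neg hfix]
          -- fuel bookkeeping: the seen-set strictly grew inside adj's values
          obtain ⟨node, hn, hyn⟩ := hyN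
          have hmlt : pvMiss adj seen' < pvMiss adj seen :=
            pvMiss_lt adj seen seen' y (fun z hz => (h1 z).mpr (Or.inl hz)) hyS' hys
              (pvNbrs_subset adj node y hyn)
          refine ihn g' seen' (pvExpand adj R) nf (d + 1) hmemeq' ?_ ?_ ?_ (by omega)
            (by push_cast at hd ⊢; omega) (by omega)
          · intro x hx
            obtain ⟨hxN, hxs⟩ := ((h2 x).mp hx).resolve_left (by simp)
            exact (h1 x).mpr (Or.inr hxN)
          · intro node' hns' hnf' x hx
            by_cases hnseen : node' ∈ seen
            · by_cases hnfr : node' ∈ frontier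
              · exact (h1 x).mpr (Or.inr ⟨node', hnfr, hx⟩)
              · exact (h1 x).mpr (Or.inl (hclosed node' hnseen hnfr x hx))
            · rcases (h1 node').mp hns' with hns | hnsN
              · exact absurd hns hnseen
              · exact absurd ((h2 node').mpr (Or.inr ⟨hnsN, hnseen⟩)) hnf'
          · intro x hx
            by_cases hxs : x ∈ seen
            · exact htgt x hxs
            · exact h3 x hx hxs

-- BRIDGE 1 assembled: A's whole run equals the level loop's whole run
theorem pvA_eq_lvl (adj : List (String × List String)) (start : String) (targets : List String)
    (cap : Int) :
    pvLoopA adj targets cap (2 * pvMiss adj (PySem.Set.ofList [start]) + 2)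
        (PySem.Set.ofList [start]) [(start, 0)] =
      pvLoopLvl adj targets cap (pvMiss adj (PySem.Set.ofList [start]) + 3)
        (PySem.Set.ofList [start]) [start] 0 := by
  have h3 : pvMiss adj (PySem.Set.ofList [start]) + 3
      = (pvMiss adj (PySem.Set.ofList [start]) + 2) + 1 := rfl
  rw [h3]
  conv_rhs => rw [pvLoopLvl]
  by_cases hcap : cap ≤ 0
  · rw [if_pos (Or.inr hcap)]
    apply pvLoopA_skip adj targets cap [(start, 0)] _ _
    · intro p hp
      simp at hp
      subst hp
      exact hcap
    · simp
  · rw [if_neg (by simp [hcap])]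
    have hb := pvBridge adj targets cap (pvMiss adj (PySem.Set.ofList [start]) + 2) 0
      [start] [] (PySem.Set.ofList [start]) (2 * pvMiss adj (PySem.Set.ofList [start]) + 2)
      (by omega) (by simp; omega) (by simp)
    simpa using hb

-- ===== VERDICT (by name: the statement is the Claim_ definition above) =====
theorem shortest_path_cap_py_spec : Claim_equal_shortest_path_cap_py := by
  unfold Claim_equal_shortest_path_cap_py
  intro adj start targets cap _
  unfold Spec_shortest_path_cap_py
  unfold shortest_path_cap_py shortest_path_cap_py_alt
  obtain ⟨k, hk⟩ : ∃ k : Nat, (max cap 0 + 1).toNat = k + 1 :=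
    ⟨(max cap 0).toNat, by omega⟩
  rw [hk]
  by_cases hst : start ∈ targets
  · rw [if_pos (by simpa using hst)]
    have hinter : (PySem.Set.inter (PySem.Set.ofList [start]) targets).isEmpty = false := by
      rw [List.isEmpty_eq_false_iff_exists_mem]
      exact ⟨start, (PySem.Set.mem_inter _ _ _).mpr ⟨by simp [PySem.Set.mem_ofList], hst⟩⟩
    simp [pvGrow, hinter]
  · rw [if_neg (by simpa using hst)]
    rw [pvA_eq_lvl, ← hk]
    apply pvLvl_eq_grow adj targets cap
    · intro x; exact Iff.rfl
    · intro x hx; simpa [PySem.Set.mem_ofList] using hx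
    · intro node hn hnf x hx
      exact absurd (by simpa [PySem.Set.mem_ofList] using hn) (by simpa [PySem.Set.mem_ofList] using hnf)
    · intro x hx
      have : x = start := by simpa [PySem.Set.mem_ofList] using hx
      subst this; exact hst
    · exact le_refl 0
    · omega
    · omega
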